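-- pv_equiv track=rewrite | github.com/medourahou/Reliable-Accessibility-framework | accessibility Framework/library/shortest_path_algo.py | shortest_path_algoithm
-- ===== SOURCE A (Python) =====
-- import heapq
--
-- def shortest_path_algoithm(stop_connections, start_stop, end_stop, start_time, hEnd):
--     """
--
--
--     Args:
--     - stop_connections: Dictionary of stop connections
--     - start_stop: Starting stop
--     - end_stop: Destination stop
--     - start_time: Initial departure time
--     - hEnd: End of time window
--
--     Returns:
--     - Shortest path arrival time or None if no alternative path found
--     """
--     # Priority queue for path exploration
--     pq = [(start_time, start_stop, [(start_stop, start_time)])]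
--     visited = {}
--
--     while pq:
--         current_time, current_stop, path = heapq.heappop(pq)
--
--         # Improved visited check with time tracking
--         if current_stop in visited and visited[current_stop] <= current_time:
--             continue
--         visited[current_stop] = current_time
--
--         # Goal reached
--         if current_stop == end_stop:
--             return current_time
--
--         # Explore connections
--         if current_stop in stop_connections:
--             for next_stop, arr_time in stop_connections[current_stop].items():
--                 # Stricter time window constraints
--                 if start_time <= current_time and current_time <= arr_time <= hEnd:
--                     # Avoid revisiting with worse time
--                     if (next_stop not in visited or
--                         arr_time < visited[next_stop]):
--                         new_path = path + [(next_stop, arr_time)]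
--                         heapq.heappush(pq, (arr_time, next_stop, new_path))
--
--     # No alternative path found
--     return None
-- ===== SOURCE B (Python) =====
-- def shortest_path_algoithm(stop_connections, start_stop, end_stop, start_time, hEnd):
--     """Bellman-Ford-style relaxation to a fixpoint instead of a heap-based
--     Dijkstra: repeatedly sweep every edge, keeping the earliest known arrival
--     time per stop, until a full sweep changes nothing."""
--     dist = {start_stop: start_time}
--     changed = True
--     while changed:
--         changed = False
--         for u, nbrs in stop_connections.items():
--             du = dist.get(u)
--             if du is None:
--                 continue
--             for v, a in nbrs.items():
--                 if du <= a <= hEnd and (v not in dist or a < dist[v]):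
--                     dist[v] = a
--                     changed = True
--     return dist.get(end_stop)
-- ===== Notes on version B (the rewrite author's own statement) =====
-- stated objective: alternative
-- what changed: Replaces the heap-based Dijkstra with path copying and a visited map by Bellman-Ford-style relaxation: a dist map of earliest known arrivals is swept over every edge repeatedly until a full sweep changes nothing; no priority queue, no paths, no visited set.
import Mathlib
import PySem

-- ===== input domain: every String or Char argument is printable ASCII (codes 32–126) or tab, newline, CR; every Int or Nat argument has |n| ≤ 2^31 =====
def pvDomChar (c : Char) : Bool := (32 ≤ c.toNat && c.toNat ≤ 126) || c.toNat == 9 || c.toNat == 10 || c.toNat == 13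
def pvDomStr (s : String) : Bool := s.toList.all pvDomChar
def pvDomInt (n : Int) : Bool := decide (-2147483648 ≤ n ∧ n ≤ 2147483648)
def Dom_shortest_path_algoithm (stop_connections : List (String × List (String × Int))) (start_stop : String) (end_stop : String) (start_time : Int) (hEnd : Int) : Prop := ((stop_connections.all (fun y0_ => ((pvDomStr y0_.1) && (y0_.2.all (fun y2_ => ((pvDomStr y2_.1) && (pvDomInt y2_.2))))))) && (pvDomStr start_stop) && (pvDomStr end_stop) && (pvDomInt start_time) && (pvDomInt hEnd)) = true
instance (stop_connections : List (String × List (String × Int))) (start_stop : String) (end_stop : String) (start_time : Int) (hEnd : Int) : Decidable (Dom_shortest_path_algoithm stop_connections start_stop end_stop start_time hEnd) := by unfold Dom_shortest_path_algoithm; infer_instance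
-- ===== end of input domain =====

-- B replaces A's heap-based Dijkstra (with path copying and a visited map) by
-- Bellman-Ford-style relaxation of a dist map to a fixpoint; same return value.


-- ===== PORT A =====
-- heap entries are Python tuples (time, stop, path); heapq pops the least
-- entry in Python's tuple/list/str lexicographic order, modelled exactly below.
abbrev PvEntry : Type := Int × String × List (String × Int)

def pvCharsLt : List Char → List Char → Bool
  | _, [] => false
  | [], _ :: _ => true
  | a :: as, b :: bs => if a < b then true else if b < a then false else pvCharsLt as bs

def pvStrLt (s t : String) : Bool := pvCharsLt s.toList t.toList

def pvPathLt : List (String × Int) → List (String × Int) → Bool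
  | _, [] => false
  | [], _ :: _ => true
  | (s, i) :: ps, (t, j) :: qs =>
    if s = t then (if i = j then pvPathLt ps qs else decide (i < j)) else pvStrLt s t

def pvEntryLt (e f : PvEntry) : Bool :=
  if e.1 = f.1 then (if e.2.1 = f.2.1 then pvPathLt e.2.2 f.2.2 else pvStrLt e.2.1 f.2.1)
  else decide (e.1 < f.1)

-- heapq.heappop: remove and return the least element (equal-comparing entries are
-- identical values, so which occurrence is removed is unobservable)
def pvMinEntry (h : PvEntry) (t : List PvEntry) : PvEntry :=
  t.foldl (fun m e => if pvEntryLt e m then e else m) h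

def pvPopMin : List PvEntry → Option (PvEntry × List PvEntry)
  | [] => none
  | h :: t => let m := pvMinEntry h t; some (m, (h :: t).erase m)

-- the dict argument, decoded as Python's dict-of-dicts (insertion order, overwrite in place)
def pvDecode (stop_connections : List (String × List (String × Int))) :
    PySem.Dict String (PySem.Dict String Int) :=
  PySem.Dict.ofList (stop_connections.map (fun r => (r.1, PySem.Dict.ofList r.2)))

-- vertices / total edge count, used only to size the structural-recursion fuel
-- (a totality guard: the while loop's termination measure is bounded by pvFuelA)
-- stops that can ever enter the queue / dist map (start plus every edge target)
def pvVerts (nsc : PySem.Dict String (PySem.Dict String Int)) (start_stop : String) : List String :=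
  (start_stop :: nsc.values.flatMap (fun d => d.keys)).dedup

def pvEdgesA (nsc : PySem.Dict String (PySem.Dict String Int)) : Nat :=
  (nsc.values.map (fun d => d.items.length)).sum

def pvFuelA (nsc : PySem.Dict String (PySem.Dict String Int)) (start_stop : String) : Nat :=
  (pvVerts nsc start_stop).length * (pvEdgesA nsc + 1) + 2

-- the while loop of A
def pvLoopA (nsc : PySem.Dict String (PySem.Dict String Int)) (end_stop : String)
    (start_time hEnd : Int) :
    Nat → List PvEntry → PySem.Dict String Int → Option Int
  | 0, _, _ => none
  | fuel + 1, pq, visited =>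
    match pvPopMin pq with
    | none => none
    | some ((t, u, path), rest) =>
      if (match visited.get? u with | some tu => decide (tu ≤ t) | none => false) then
        pvLoopA nsc end_stop start_time hEnd fuel rest visited
      else
        let visited' := visited.insert u t
        if u = end_stop then some t
        else
          let pq' :=
            match nsc.get? u with
            | none => rest
            | some nbrs =>
              nbrs.items.foldl (fun acc ve =>
                if (decide (start_time ≤ t ∧ t ≤ ve.2 ∧ ve.2 ≤ hEnd) &&
                    (match visited'.get? ve.1 with
                     | none => true
                     | some tv => decide (ve.2 < tv))) = true then
                  acc ++ [(ve.2, ve.1, path ++ [(ve.1, ve.2)])]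
                else acc) rest
          pvLoopA nsc end_stop start_time hEnd fuel pq' visited'

def shortest_path_algoithm (stop_connections : List (String × List (String × Int))) (start_stop : String) (end_stop : String) (start_time : Int) (hEnd : Int) : Option Int :=
  let nsc := pvDecode stop_connections
  pvLoopA nsc end_stop start_time hEnd (pvFuelA nsc start_stop)
    [(start_time, start_stop, [(start_stop, start_time)])] PySem.Dict.empty

-- ===== PORT B =====
-- relax one edge (v, a) given du = dist[u] read at the head of the row
def pvRelax (hEnd du : Int) (st : PySem.Dict String Int × Bool) (va : String × Int) :
    PySem.Dict String Int × Bool :=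
  if du ≤ va.2 ∧ va.2 ≤ hEnd ∧
      (match st.1.get? va.1 with | none => true | some dv => decide (va.2 < dv)) = true then
    (st.1.insert va.1 va.2, true)
  else st

def pvRow (hEnd : Int) (st : PySem.Dict String Int × Bool)
    (row : String × PySem.Dict String Int) : PySem.Dict String Int × Bool :=
  match st.1.get? row.1 with
  | none => st
  | some du => row.2.items.foldl (pvRelax hEnd du) st

-- one full sweep over every edge (one iteration of the while body)
def pvPass (nsc : PySem.Dict String (PySem.Dict String Int)) (hEnd : Int)
    (d : PySem.Dict String Int) : PySem.Dict String Int × Bool :=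
  nsc.items.foldl (pvRow hEnd) (d, false)

-- fuel bound for the while loop (totality guard: each changing sweep strictly
-- shrinks some dist value within a finite candidate set)
def pvTimesB (nsc : PySem.Dict String (PySem.Dict String Int)) (start_time : Int) : List Int :=
  start_time :: nsc.values.flatMap (fun d => d.values)

def pvFuelB (nsc : PySem.Dict String (PySem.Dict String Int)) (start_stop : String)
    (start_time : Int) : Nat :=
  (pvVerts nsc start_stop).length * ((pvTimesB nsc start_time).length + 2) + 2

def pvLoopB (nsc : PySem.Dict String (PySem.Dict String Int)) (hEnd : Int) :
    Nat → PySem.Dict String Int → PySem.Dict String Int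
  | 0, d => d
  | fuel + 1, d =>
    let r := pvPass nsc hEnd d
    if r.2 then pvLoopB nsc hEnd fuel r.1 else r.1

def shortest_path_algoithm_alt (stop_connections : List (String × List (String × Int))) (start_stop : String) (end_stop : String) (start_time : Int) (hEnd : Int) : Option Int :=
  let nsc := pvDecode stop_connections
  (pvLoopB nsc hEnd (pvFuelB nsc start_stop start_time)
    (PySem.Dict.empty.insert start_stop start_time)).get? end_stop

-- ===== PRECONDITION & SPEC =====
def Spec_shortest_path_algoithm (stop_connections : List (String × List (String × Int))) (start_stop : String) (end_stop : String) (start_time : Int) (hEnd : Int) (out : Option Int) : Prop := out = shortest_path_algoithm_alt stop_connections start_stop end_stop start_time hEnd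
instance (stop_connections : List (String × List (String × Int))) (start_stop : String) (end_stop : String) (start_time : Int) (hEnd : Int) (out : Option Int) : Decidable (Spec_shortest_path_algoithm stop_connections start_stop end_stop start_time hEnd out) := by unfold Spec_shortest_path_algoithm; infer_instance

-- ===== CLAIM (what is proved, stated in full; the proofs are below) =====
def Claim_equal_shortest_path_algoithm : Prop := ∀ (stop_connections : List (String × List (String × Int))) (start_stop : String) (end_stop : String) (start_time : Int) (hEnd : Int), Dom_shortest_path_algoithm stop_connections start_stop end_stop start_time hEnd → Spec_shortest_path_algoithm stop_connections start_stop end_stop start_time hEnd (shortest_path_algoithm stop_connections start_stop end_stop start_time hEnd)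

-- ===== LEMMAS AND PROOFS =====

-- ---------- the common specification: valid arrivals and the minimal one ----------

-- a stop v is reachable at time a by a chain of edges whose arrival times are
-- nondecreasing and ≤ hE, starting from S at time t0
inductive PvValid (nsc : PySem.Dict String (PySem.Dict String Int)) (S : String) (t0 hE : Int) :
    String → Int → Prop
  | base : PvValid nsc S t0 hE S t0
  | step {u : String} {t : Int} {v : String} {a : Int} (nbrs : PySem.Dict String Int) :
      PvValid nsc S t0 hE u t → nsc.get? u = some nbrs → nbrs.get? v = some a →
      t ≤ a → a ≤ hE → PvValid nsc S t0 hE v a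

def PvIsAns (nsc : PySem.Dict String (PySem.Dict String Int)) (S : String) (t0 hE : Int)
    (en : String) : Option Int → Prop
  | some a => PvValid nsc S t0 hE en a ∧ ∀ b, PvValid nsc S t0 hE en b → a ≤ b
  | none => ∀ b, ¬ PvValid nsc S t0 hE en b

def PvInner (nsc : PySem.Dict String (PySem.Dict String Int)) : Prop :=
  nsc.keys.Nodup ∧ ∀ nb ∈ nsc.values, nb.keys.Nodup

lemma pvIsAns_unique {nsc : PySem.Dict String (PySem.Dict String Int)} {S : String} {t0 hE : Int}
    {en : String} {o o' : Option Int} (h : PvIsAns nsc S t0 hE en o)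
    (h' : PvIsAns nsc S t0 hE en o') : o = o' := by
  cases o with
  | none =>
    cases o' with
    | none => rfl
    | some b => exact absurd h'.1 (h b)
  | some a =>
    cases o' with
    | none => exact absurd h.1 (h' a)
    | some b => exact congrArg some (le_antisymm (h.2 b h'.1) (h'.2 a h.1))

lemma pv_values_foldl {P : PySem.Dict String Int → Prop}
    (l : List (String × PySem.Dict String Int)) (d : PySem.Dict String (PySem.Dict String Int))
    (hd : ∀ nb ∈ d.values, P nb) (hl : ∀ p ∈ l, P p.2) :
    ∀ nb ∈ (l.foldl (fun acc p => acc.insert p.1 p.2) d).values, P nb := by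
  induction l generalizing d with
  | nil => simpa using hd
  | cons p l ih =>
    intro nb hnb
    refine ih (d.insert p.1 p.2) ?_ (fun q hq => hl q (List.mem_cons_of_mem _ hq)) nb hnb
    intro nb' hnb'
    rcases PySem.Dict.mem_values_insert d p.1 p.2 nb' hnb' with h | h
    · exact h ▸ hl p (List.mem_cons_self ..)
    · exact hd nb' h

lemma pvInner_decode (sc : List (String × List (String × Int))) : PvInner (pvDecode sc) := by
  refine ⟨PySem.Dict.nodup_keys_ofList _, ?_⟩
  intro nb hnb
  have : ∀ x ∈ (pvDecode sc).values, ∃ r : List (String × Int), x = PySem.Dict.ofList r := by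
    apply pv_values_foldl (P := fun x => ∃ r : List (String × Int), x = PySem.Dict.ofList r)
    · intro x hx; simp [PySem.Dict.values, PySem.Dict.empty] at hx
    · intro p hp
      rcases List.mem_map.mp hp with ⟨r, _, rfl⟩
      exact ⟨r.2, rfl⟩
  rcases this nb hnb with ⟨r, rfl⟩
  exact PySem.Dict.nodup_keys_ofList r

lemma pvValid_t0_le {nsc : PySem.Dict String (PySem.Dict String Int)} {S : String} {t0 hE : Int}
    {v : String} {a : Int} (h : PvValid nsc S t0 hE v a) : t0 ≤ a := by
  induction h with
  | base => exact le_refl _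
  | step _ _ _ _ hta _ ih => exact le_trans ih hta

lemma pvValid_mem_verts {nsc : PySem.Dict String (PySem.Dict String Int)} {S : String}
    {t0 hE : Int} {v : String} {a : Int} (h : PvValid nsc S t0 hE v a) : v ∈ pvVerts nsc S := by
  induction h with
  | base => simp [pvVerts, List.mem_dedup]
  | step nbrs _ hu hv _ _ _ =>
    have h1 : nbrs ∈ nsc.values := by
      simp only [PySem.Dict.values]
      exact List.mem_map.mpr ⟨_, PySem.Dict.mem_items_of_get?_eq_some nsc hu, rfl⟩
    have h2 := PySem.Dict.mem_keys_of_mem_items nbrs (PySem.Dict.mem_items_of_get?_eq_some nbrs hv)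
    simp only [pvVerts, List.mem_dedup, List.mem_cons, List.mem_flatMap]
    exact Or.inr ⟨nbrs, h1, h2⟩

-- ---------- A side: the Dijkstra loop returns the minimal valid arrival ----------

lemma pvEntryLt_fst {e f : PvEntry} (h : pvEntryLt e f = true) : e.1 ≤ f.1 := by
  unfold pvEntryLt at h
  split_ifs at h with h1 <;> simp_all <;> omega

lemma pvEntryLt_fst_false {e f : PvEntry} (h : pvEntryLt e f = false) : f.1 ≤ e.1 := by
  unfold pvEntryLt at h
  split_ifs at h with h1 <;> simp_all <;> omega

lemma pvMinEntry_spec (h : PvEntry) (t : List PvEntry) :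
    pvMinEntry h t ∈ h :: t ∧ ∀ e ∈ h :: t, (pvMinEntry h t).1 ≤ e.1 := by
  induction t generalizing h with
  | nil => simp [pvMinEntry]
  | cons x t ih =>
    have hstep : pvMinEntry h (x :: t) = pvMinEntry (if pvEntryLt x h then x else h) t := by
      simp [pvMinEntry, List.foldl_cons]
    rcases ih (if pvEntryLt x h then x else h) with ⟨hmem, hmin⟩
    rw [hstep]
    constructor
    · rcases List.mem_cons.mp hmem with hm | hm
      · rw [hm]; split_ifs <;> simp
      · simp [hm]
    · intro e he
      have hself := hmin _ (List.mem_cons_self ..)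
      have hle_h : (pvMinEntry (if pvEntryLt x h = true then x else h) t).1 ≤ h.1 := by
        by_cases hlt : pvEntryLt x h = true
        · rw [if_pos hlt] at hself ⊢
          exact le_trans hself (pvEntryLt_fst hlt)
        · rw [if_neg hlt] at hself ⊢
          exact hself
      have hle_x : (pvMinEntry (if pvEntryLt x h = true then x else h) t).1 ≤ x.1 := by
        by_cases hlt : pvEntryLt x h = true
        · rw [if_pos hlt] at hself ⊢
          exact hself
        · rw [if_neg hlt] at hself ⊢
          exact le_trans hself (pvEntryLt_fst_false (Bool.not_eq_true _ ▸ hlt))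
      rcases List.mem_cons.mp he with rfl | he'
      · exact hle_h
      rcases List.mem_cons.mp he' with rfl | he''
      · exact hle_x
      · exact hmin e (List.mem_cons_of_mem _ he'')

lemma pvPopMin_none {pq : List PvEntry} : pvPopMin pq = none ↔ pq = [] := by
  cases pq <;> simp [pvPopMin]

lemma pvPopMin_spec {pq : List PvEntry} {m : PvEntry} {rest : List PvEntry}
    (h : pvPopMin pq = some (m, rest)) :
    m ∈ pq ∧ rest = pq.erase m ∧ ∀ e ∈ pq, m.1 ≤ e.1 := by
  cases pq with
  | nil => simp [pvPopMin] at h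
  | cons x t =>
    simp only [pvPopMin, Option.some.injEq, Prod.mk.injEq] at h
    rcases h with ⟨rfl, rfl⟩
    exact ⟨(pvMinEntry_spec x t).1, rfl, (pvMinEntry_spec x t).2⟩

def pvMeasA (nsc : PySem.Dict String (PySem.Dict String Int)) (S : String)
    (pq : List PvEntry) (vis : PySem.Dict String Int) : Nat :=
  pq.length + ((pvVerts nsc S).filter (fun v => (vis.get? v).isNone)).length * (pvEdgesA nsc + 1)

structure PvInvA (nsc : PySem.Dict String (PySem.Dict String Int)) (S en : String)
    (t0 hE : Int) (pq : List PvEntry) (vis : PySem.Dict String Int) : Prop where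
  sound_pq : ∀ e ∈ pq, PvValid nsc S t0 hE e.2.1 e.1
  sound_vis : ∀ u tu, vis.get? u = some tu → PvValid nsc S t0 hE u tu
  order : ∀ u tu, vis.get? u = some tu → ∀ e ∈ pq, tu ≤ e.1
  vc2 : ∀ u tu, vis.get? u = some tu → ∀ nbrs v a, nsc.get? u = some nbrs →
    nbrs.get? v = some a → tu ≤ a → a ≤ hE →
    (∃ tv, vis.get? v = some tv ∧ tv ≤ a) ∨ (∃ e ∈ pq, e.2.1 = v ∧ e.1 ≤ a)
  no_end : vis.get? en = none
  start_cov : (∃ tv, vis.get? S = some tv ∧ tv ≤ t0) ∨ (∃ e ∈ pq, e.2.1 = S ∧ e.1 ≤ t0)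

lemma pvWalk {nsc : PySem.Dict String (PySem.Dict String Int)} {S en : String} {t0 hE : Int}
    {pq : List PvEntry} {vis : PySem.Dict String Int}
    (inv : PvInvA nsc S en t0 hE pq vis) {v : String} {a : Int}
    (h : PvValid nsc S t0 hE v a) :
    (∃ tv, vis.get? v = some tv ∧ tv ≤ a) ∨ (∃ e ∈ pq, e.2.1 = v ∧ e.1 ≤ a) ∨
      (∃ e ∈ pq, e.1 ≤ a) := by
  induction h with
  | base =>
    rcases inv.start_cov with h | ⟨e, he, h1, h2⟩
    · exact Or.inl h
    · exact Or.inr (Or.inl ⟨e, he, h1, h2⟩)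
  | step nbrs _ hu hv hta hhe ih =>
    rename_i u t v' a' _
    rcases ih with ⟨tu, htu, hle⟩ | ⟨e, he, he1, he2⟩ | ⟨e, he, he2⟩
    · rcases inv.vc2 u tu htu nbrs v' a' hu hv (le_trans hle hta) hhe with h | ⟨e, he, h1, h2⟩
      · exact Or.inl h
      · exact Or.inr (Or.inl ⟨e, he, h1, h2⟩)
    · exact Or.inr (Or.inr ⟨e, he, le_trans he2 hta⟩)
    · exact Or.inr (Or.inr ⟨e, he, le_trans he2 hta⟩)

lemma pvFilter_lt_of_change {V : List String} (hnd : V.Nodup) {u : String} (hu : u ∈ V)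
    {p q : String → Bool} (hpu : p u = true) (hqu : q u = false)
    (hagree : ∀ x ∈ V, x ≠ u → q x = p x) :
    (V.filter q).length + 1 ≤ (V.filter p).length := by
  induction V with
  | nil => simp at hu
  | cons x V ih =>
    rcases List.mem_cons.mp hu with rfl | hu'
    · have hq : ∀ y ∈ V, q y = p y := fun y hy =>
        hagree y (List.mem_cons_of_mem _ hy) (fun h => (List.nodup_cons.mp hnd).1 (h ▸ hy))
      have : V.filter q = V.filter p := List.filter_congr hq
      simp [List.filter_cons, hpu, hqu, this]
    · have hxne : x ≠ u := fun h => (List.nodup_cons.mp hnd).1 (h ▸ hu')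
      have hqx : q x = p x := hagree x (List.mem_cons_self ..) hxne
      have := ih (List.nodup_cons.mp hnd).2 hu'
        (fun y hy hyne => hagree y (List.mem_cons_of_mem _ hy) hyne)
      simp only [List.filter_cons, hqx]
      cases p x <;> simpa using this

lemma pvEdges_bound {nsc : PySem.Dict String (PySem.Dict String Int)}
    {nbrs : PySem.Dict String Int} (h : nbrs ∈ nsc.values) :
    nbrs.items.length ≤ pvEdgesA nsc := by
  have : nbrs.items.length ∈ (nsc.values.map (fun d => d.items.length)) :=
    List.mem_map_of_mem h
  exact List.le_sum_of_mem this

-- loop-step equations for pvLoopA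
lemma pvLoopA_step_skip {nsc : PySem.Dict String (PySem.Dict String Int)} {en : String}
    {t0 hE : Int} {fuel : Nat} {pq rest : List PvEntry} {t : Int} {u : String}
    {path : List (String × Int)} {vis : PySem.Dict String Int}
    (h : pvPopMin pq = some ((t, u, path), rest))
    (hs : (match vis.get? u with | some tu => decide (tu ≤ t) | none => false) = true) :
    pvLoopA nsc en t0 hE (fuel + 1) pq vis = pvLoopA nsc en t0 hE fuel rest vis := by
  rw [pvLoopA, h]
  simp only [hs, if_true]

lemma pvLoopA_step_found {nsc : PySem.Dict String (PySem.Dict String Int)} {en : String}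
    {t0 hE : Int} {fuel : Nat} {pq rest : List PvEntry} {t : Int} {u : String}
    {path : List (String × Int)} {vis : PySem.Dict String Int}
    (h : pvPopMin pq = some ((t, u, path), rest))
    (hs : (match vis.get? u with | some tu => decide (tu ≤ t) | none => false) = false)
    (hue : u = en) :
    pvLoopA nsc en t0 hE (fuel + 1) pq vis = some t := by
  rw [pvLoopA, h]
  simp only [hs, Bool.false_eq_true, if_false]
  rw [if_pos hue]

lemma pvLoopA_step_go_none {nsc : PySem.Dict String (PySem.Dict String Int)} {en : String}
    {t0 hE : Int} {fuel : Nat} {pq rest : List PvEntry} {t : Int} {u : String}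
    {path : List (String × Int)} {vis : PySem.Dict String Int}
    (h : pvPopMin pq = some ((t, u, path), rest))
    (hs : (match vis.get? u with | some tu => decide (tu ≤ t) | none => false) = false)
    (hue : ¬ u = en) (hnb : nsc.get? u = none) :
    pvLoopA nsc en t0 hE (fuel + 1) pq vis = pvLoopA nsc en t0 hE fuel rest (vis.insert u t) := by
  rw [pvLoopA, h]
  simp only [hs, Bool.false_eq_true, if_false]
  rw [if_neg hue]
  simp only [hnb]

def pvPushCond (t0 hE t : Int) (vis' : PySem.Dict String Int) (ve : String × Int) : Bool :=
  decide (t0 ≤ t ∧ t ≤ ve.2 ∧ ve.2 ≤ hE) &&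
    (match vis'.get? ve.1 with | none => true | some tv => decide (ve.2 < tv))

lemma pvLoopA_step_go_some {nsc : PySem.Dict String (PySem.Dict String Int)} {en : String}
    {t0 hE : Int} {fuel : Nat} {pq rest : List PvEntry} {t : Int} {u : String}
    {path : List (String × Int)} {vis : PySem.Dict String Int}
    {nbrs : PySem.Dict String Int}
    (h : pvPopMin pq = some ((t, u, path), rest))
    (hs : (match vis.get? u with | some tu => decide (tu ≤ t) | none => false) = false)
    (hue : ¬ u = en) (hnb : nsc.get? u = some nbrs) :
    pvLoopA nsc en t0 hE (fuel + 1) pq vis =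
      pvLoopA nsc en t0 hE fuel
        (rest ++ (nbrs.items.filter (pvPushCond t0 hE t (vis.insert u t))).map
          (fun ve => (ve.2, ve.1, path ++ [(ve.1, ve.2)])))
        (vis.insert u t) := by
  rw [pvLoopA, h]
  simp only [hs, Bool.false_eq_true, if_false]
  rw [if_neg hue]
  simp only [hnb]
  exact congrArg (fun z => pvLoopA nsc en t0 hE fuel z (vis.insert u t))
    (PySem.List.foldl_append_if (pvPushCond t0 hE t (vis.insert u t))
      (fun ve => (ve.2, ve.1, path ++ [(ve.1, ve.2)])) nbrs.items rest)

-- the invariant survives processing a popped, not-yet-visited stop u ≠ en,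
-- for any pushed list P that is sound, no earlier than t, and covers u's edges
lemma pvInvA_step (nsc : PySem.Dict String (PySem.Dict String Int)) (S en : String)
    (t0 hE : Int) {pq rest : List PvEntry} {vis : PySem.Dict String Int} {t : Int}
    {u : String} {path : List (String × Int)} {P : List PvEntry}
    (inv : PvInvA nsc S en t0 hE pq vis)
    (hpop : pvPopMin pq = some ((t, u, path), rest))
    (hu_none : vis.get? u = none) (hune : u ≠ en)
    (hP_sound : ∀ e ∈ P, PvValid nsc S t0 hE e.2.1 e.1)
    (hP_ge : ∀ e ∈ P, t ≤ e.1)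
    (hP_cov : ∀ nbrs' (v : String) (a : Int), nsc.get? u = some nbrs' →
      nbrs'.get? v = some a → t ≤ a → a ≤ hE →
      (∃ tv, (vis.insert u t).get? v = some tv ∧ tv ≤ a) ∨ (∃ e ∈ P, e.2.1 = v ∧ e.1 ≤ a)) :
    PvInvA nsc S en t0 hE (rest ++ P) (vis.insert u t) := by
  obtain ⟨hmem, hrest, hmin⟩ := pvPopMin_spec hpop
  have hrest_sub : ∀ e ∈ rest, e ∈ pq := by
    intro e he; rw [hrest] at he; exact List.mem_of_mem_erase he
  have hminr : ∀ e ∈ rest, t ≤ e.1 := fun e he => hmin e (hrest_sub e he)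
  have hvalid_u : PvValid nsc S t0 hE u t := inv.sound_pq (t, u, path) hmem
  refine ⟨?_, ?_, ?_, ?_, ?_, ?_⟩
  · -- sound_pq
    intro e he
    rcases List.mem_append.mp he with he | he
    · exact inv.sound_pq e (hrest_sub e he)
    · exact hP_sound e he
  · -- sound_vis
    intro x tx hx
    rw [PySem.Dict.get?_insert] at hx
    by_cases hxu : x = u
    · rw [if_pos hxu] at hx; injection hx with hx; subst hx; subst hxu; exact hvalid_u
    · rw [if_neg hxu] at hx; exact inv.sound_vis x tx hx
  · -- order
    intro x tx hx e he
    rw [PySem.Dict.get?_insert] at hx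
    rcases List.mem_append.mp he with he' | he'
    · by_cases hxu : x = u
      · rw [if_pos hxu] at hx; injection hx with hx; subst hx; exact hminr e he'
      · rw [if_neg hxu] at hx; exact inv.order x tx hx e (hrest_sub e he')
    · by_cases hxu : x = u
      · rw [if_pos hxu] at hx; injection hx with hx; subst hx; exact hP_ge e he'
      · rw [if_neg hxu] at hx
        exact le_trans (inv.order x tx hx (t, u, path) hmem) (hP_ge e he')
  · -- vc2
    intro x tx hx nbrs' v a hxn hva htx hahe
    rw [PySem.Dict.get?_insert] at hx
    by_cases hxu : x = u
    · rw [if_pos hxu] at hx; injection hx with hx; subst hx; subst hxu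
      rcases hP_cov nbrs' v a hxn hva htx hahe with hl | ⟨e, he, he1, he2⟩
      · exact Or.inl hl
      · exact Or.inr ⟨e, List.mem_append.mpr (Or.inr he), he1, he2⟩
    · rw [if_neg hxu] at hx
      rcases inv.vc2 x tx hx nbrs' v a hxn hva htx hahe with ⟨tv, htv, hle⟩ | ⟨e, he, he1, he2⟩
      · have hvu : v ≠ u := by
          intro hvu; rw [hvu, hu_none] at htv; cases htv
        refine Or.inl ⟨tv, ?_, hle⟩
        rw [PySem.Dict.get?_insert, if_neg hvu]
        exact htv
      · by_cases hem : e = (t, u, path)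
        · subst hem
          refine Or.inl ⟨t, ?_, he2⟩
          rw [← he1]
          exact PySem.Dict.get?_insert_self _ _ _
        · refine Or.inr ⟨e, List.mem_append.mpr (Or.inl ?_), he1, he2⟩
          rw [hrest]
          exact (List.mem_erase_of_ne hem).mpr he
  · -- no_end
    rw [PySem.Dict.get?_insert, if_neg (fun h => hune h.symm)]
    exact inv.no_end
  · -- start_cov
    rcases inv.start_cov with ⟨tv, htv, hle⟩ | ⟨e, he, he1, he2⟩
    · have hSu : S ≠ u := by
        intro hSu; rw [hSu, hu_none] at htv; cases htv
      refine Or.inl ⟨tv, ?_, hle⟩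
      rw [PySem.Dict.get?_insert, if_neg hSu]
      exact htv
    · by_cases hem : e = (t, u, path)
      · subst hem
        refine Or.inl ⟨t, ?_, he2⟩
        rw [← he1]
        exact PySem.Dict.get?_insert_self _ _ _
      · refine Or.inr ⟨e, List.mem_append.mpr (Or.inl ?_), he1, he2⟩
        rw [hrest]
        exact (List.mem_erase_of_ne hem).mpr he

lemma pvLoopA_isAns (nsc : PySem.Dict String (PySem.Dict String Int)) (S en : String)
    (t0 hE : Int) (hin : PvInner nsc) :
    ∀ (fuel : Nat) (pq : List PvEntry) (vis : PySem.Dict String Int),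
      PvInvA nsc S en t0 hE pq vis → pvMeasA nsc S pq vis < fuel →
      PvIsAns nsc S t0 hE en (pvLoopA nsc en t0 hE fuel pq vis) := by
  intro fuel
  induction fuel with
  | zero => intro pq vis _ hm; exact absurd hm (Nat.not_lt_zero _)
  | succ fuel ih =>
    intro pq vis inv hm
    cases hpop : pvPopMin pq with
    | none =>
      have hpq : pq = [] := pvPopMin_none.mp hpop
      subst hpq
      have hred : pvLoopA nsc en t0 hE (fuel + 1) [] vis = none := rfl
      rw [hred]
      intro b hb
      rcases pvWalk inv hb with ⟨tv, htv, _⟩ | ⟨e, he, _, _⟩ | ⟨e, he, _⟩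
      · rw [inv.no_end] at htv; cases htv
      · cases he
      · cases he
    | some mr =>
      obtain ⟨⟨t, u, path⟩, rest⟩ := mr
      obtain ⟨hmem, hrest, hmin⟩ := pvPopMin_spec hpop
      have hrest_sub : ∀ e ∈ rest, e ∈ pq := by
        intro e he; rw [hrest] at he; exact List.mem_of_mem_erase he
      have hlenr : rest.length + 1 = pq.length := by
        have hpos : 0 < pq.length := List.length_pos_of_mem hmem
        rw [hrest, List.length_erase_of_mem hmem]
        omega
      by_cases hskip : (match vis.get? u with
          | some tu => decide (tu ≤ t) | none => false) = true
      · -- revisit with no better time: skip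
        rw [pvLoopA_step_skip hpop hskip]
        obtain ⟨tu, htu, htut⟩ : ∃ tu, vis.get? u = some tu ∧ tu ≤ t := by
          cases hv : vis.get? u with
          | none => rw [hv] at hskip; cases hskip
          | some tu => rw [hv] at hskip; exact ⟨tu, rfl, by simpa using hskip⟩
        apply ih rest vis
        · refine ⟨fun e he => inv.sound_pq e (hrest_sub e he), inv.sound_vis,
            fun x tx hx e he => inv.order x tx hx e (hrest_sub e he), ?_, inv.no_end, ?_⟩
          · intro x tx hx nbrs v a hxn hva htx hahe
            rcases inv.vc2 x tx hx nbrs v a hxn hva htx hahe with hl | ⟨e, he, he1, he2⟩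
            · exact Or.inl hl
            · by_cases hem : e = (t, u, path)
              · subst hem
                refine Or.inl ⟨tu, ?_, le_trans htut he2⟩
                rw [← he1]
                exact htu
              · refine Or.inr ⟨e, ?_, he1, he2⟩
                rw [hrest]
                exact (List.mem_erase_of_ne hem).mpr he
          · rcases inv.start_cov with hl | ⟨e, he, he1, he2⟩
            · exact Or.inl hl
            · by_cases hem : e = (t, u, path)
              · subst hem
                refine Or.inl ⟨tu, ?_, le_trans htut he2⟩
                rw [← he1]
                exact htu
              · refine Or.inr ⟨e, ?_, he1, he2⟩
                rw [hrest]
                exact (List.mem_erase_of_ne hem).mpr he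
        · unfold pvMeasA at hm ⊢
          omega
      · -- process u
        have hskipf : (match vis.get? u with
            | some tu => decide (tu ≤ t) | none => false) = false :=
          eq_false_of_ne_true hskip
        have hvalid_u : PvValid nsc S t0 hE u t := inv.sound_pq (t, u, path) hmem
        have ht0t : t0 ≤ t := pvValid_t0_le hvalid_u
        have hu_none : vis.get? u = none := by
          cases hv : vis.get? u with
          | none => rfl
          | some tu =>
            have hle := inv.order u tu hv (t, u, path) hmem
            rw [hv] at hskipf
            simp only [decide_eq_false_iff_not] at hskipf
            exact absurd hle hskipf
        have humem : u ∈ pvVerts nsc S := pvValid_mem_verts hvalid_u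
        have hcnt : ((pvVerts nsc S).filter (fun v => ((vis.insert u t).get? v).isNone)).length
            + 1 ≤ ((pvVerts nsc S).filter (fun v => (vis.get? v).isNone)).length := by
          refine pvFilter_lt_of_change (List.nodup_dedup _) humem ?_ ?_ ?_
          · rw [hu_none]; rfl
          · rw [PySem.Dict.get?_insert_self]; rfl
          · intro x _ hxu
            rw [PySem.Dict.get?_insert_of_ne _ _ hxu]
        by_cases hue : u = en
        · -- goal reached: the popped time is the minimum
          rw [pvLoopA_step_found hpop hskipf hue]
          subst hue
          refine ⟨hvalid_u, ?_⟩
          intro b hb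
          rcases pvWalk inv hb with ⟨tv, htv, _⟩ | ⟨e, he, _, he2⟩ | ⟨e, he, he2⟩
          · rw [inv.no_end] at htv; cases htv
          · exact le_trans (hmin e he) he2
          · exact le_trans (hmin e he) he2
        · cases hnb : nsc.get? u with
          | none =>
            rw [pvLoopA_step_go_none hpop hskipf hue hnb]
            have hinv' : PvInvA nsc S en t0 hE (rest ++ []) (vis.insert u t) := by
              refine pvInvA_step nsc S en t0 hE inv hpop hu_none hue ?_ ?_ ?_
              · intro e he; cases he
              · intro e he; cases he
              · intro nbrs' v a hxn _ _ _
                rw [hnb] at hxn; cases hxn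
            rw [List.append_nil] at hinv'
            apply ih rest (vis.insert u t) hinv'
            have hprod : ((pvVerts nsc S).filter
                (fun v => ((vis.insert u t).get? v).isNone)).length * (pvEdgesA nsc + 1)
                ≤ ((pvVerts nsc S).filter
                  (fun v => (vis.get? v).isNone)).length * (pvEdgesA nsc + 1) :=
              Nat.mul_le_mul_right _ (by omega)
            unfold pvMeasA at hm ⊢
            omega
          | some nbrs =>
            rw [pvLoopA_step_go_some hpop hskipf hue hnb]
            have hnbval : nbrs ∈ nsc.values := by
              simp only [PySem.Dict.values]
              exact List.mem_map.mpr ⟨_, PySem.Dict.mem_items_of_get?_eq_some nsc hnb, rfl⟩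
            have hnodup_nb : nbrs.keys.Nodup := hin.2 nbrs hnbval
            set P := (nbrs.items.filter (pvPushCond t0 hE t (vis.insert u t))).map
              (fun ve => (ve.2, ve.1, path ++ [(ve.1, ve.2)])) with hP
            have hPdecomp : ∀ e ∈ P, ∃ ve ∈ nbrs.items,
                pvPushCond t0 hE t (vis.insert u t) ve = true ∧
                e = (ve.2, ve.1, path ++ [(ve.1, ve.2)]) := by
              intro e he
              rcases List.mem_map.mp he with ⟨ve, hvef, rfl⟩
              rcases List.mem_filter.mp hvef with ⟨hvem, hvec⟩
              exact ⟨ve, hvem, hvec, rfl⟩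
            have hcond_parts : ∀ ve : String × Int,
                pvPushCond t0 hE t (vis.insert u t) ve = true →
                t ≤ ve.2 ∧ ve.2 ≤ hE := by
              intro ve hc
              rcases Bool.and_eq_true_iff.mp hc with ⟨h1, _⟩
              rcases of_decide_eq_true h1 with ⟨_, h3, h4⟩
              exact ⟨h3, h4⟩
            have hinv' : PvInvA nsc S en t0 hE (rest ++ P) (vis.insert u t) := by
              refine pvInvA_step nsc S en t0 hE inv hpop hu_none hue ?_ ?_ ?_
              · intro e he
                rcases hPdecomp e he with ⟨ve, hvem, hvec, rfl⟩
                have hget : nbrs.get? ve.1 = some ve.2 :=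
                  PySem.Dict.get?_of_mem_items nbrs (by simpa using hvem) hnodup_nb
                exact PvValid.step nbrs hvalid_u hnb hget (hcond_parts ve hvec).1
                  (hcond_parts ve hvec).2
              · intro e he
                rcases hPdecomp e he with ⟨ve, hvem, hvec, rfl⟩
                exact (hcond_parts ve hvec).1
              · intro nbrs' v a hxn hva hta hahe
                rw [hnb] at hxn
                injection hxn with hxn
                subst hxn
                have hvamem : (v, a) ∈ nbrs.items :=
                  PySem.Dict.mem_items_of_get?_eq_some nbrs hva
                have hcondA : decide (t0 ≤ t ∧ t ≤ (v, a).2 ∧ (v, a).2 ≤ hE) = true :=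
                  decide_eq_true ⟨ht0t, hta, hahe⟩
                cases hgv : (vis.insert u t).get? v with
                | none =>
                  have hpc : pvPushCond t0 hE t (vis.insert u t) (v, a) = true := by
                    unfold pvPushCond
                    rw [hcondA, hgv]
                    rfl
                  refine Or.inr ⟨(a, v, path ++ [(v, a)]), ?_, rfl, le_refl a⟩
                  exact List.mem_map.mpr ⟨(v, a), List.mem_filter.mpr ⟨hvamem, hpc⟩, rfl⟩
                | some tv =>
                  by_cases hlt : a < tv
                  · have hpc : pvPushCond t0 hE t (vis.insert u t) (v, a) = true := by
                      unfold pvPushCond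
                      rw [hcondA, hgv]
                      simpa using hlt
                    refine Or.inr ⟨(a, v, path ++ [(v, a)]), ?_, rfl, le_refl a⟩
                    exact List.mem_map.mpr ⟨(v, a), List.mem_filter.mpr ⟨hvamem, hpc⟩, rfl⟩
                  · exact Or.inl ⟨tv, rfl, by omega⟩
            apply ih _ _ hinv'
            have hPlen : P.length ≤ pvEdgesA nsc := by
              rw [hP, List.length_map]
              exact le_trans (List.length_filter_le _ _) (pvEdges_bound hnbval)
            have hprod : (((pvVerts nsc S).filter
                (fun v => ((vis.insert u t).get? v).isNone)).length + 1) * (pvEdgesA nsc + 1)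
                ≤ ((pvVerts nsc S).filter
                  (fun v => (vis.get? v).isNone)).length * (pvEdgesA nsc + 1) :=
              Nat.mul_le_mul_right _ hcnt
            unfold pvMeasA at hm ⊢
            rw [List.length_append]
            rw [Nat.add_mul, Nat.one_mul] at hprod
            omega

-- ---------- B side: the relaxation fixpoint is the same minimal arrival ----------

def PvSound (nsc : PySem.Dict String (PySem.Dict String Int)) (S : String) (t0 hE : Int)
    (d : PySem.Dict String Int) : Prop :=
  ∀ v t, d.get? v = some t → PvValid nsc S t0 hE v t

def PvStartHas (S : String) (t0 : Int) (d : PySem.Dict String Int) : Prop :=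
  ∃ ts, d.get? S = some ts ∧ ts ≤ t0

def PvLe (d' d : PySem.Dict String Int) : Prop :=
  ∀ v t, d.get? v = some t → ∃ t', d'.get? v = some t' ∧ t' ≤ t

def PvClosed (nsc : PySem.Dict String (PySem.Dict String Int)) (hE : Int)
    (d : PySem.Dict String Int) : Prop :=
  ∀ u du nbrs v a, d.get? u = some du → nsc.get? u = some nbrs → nbrs.get? v = some a →
    du ≤ a → a ≤ hE → ∃ dv, d.get? v = some dv ∧ dv ≤ a

lemma pvLe_refl (d : PySem.Dict String Int) : PvLe d d :=
  fun v t h => ⟨t, h, le_refl _⟩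

lemma pvLe_trans {d1 d2 d3 : PySem.Dict String Int} (h12 : PvLe d1 d2) (h23 : PvLe d2 d3) :
    PvLe d1 d3 := by
  intro v t h
  rcases h23 v t h with ⟨t2, h2, hle2⟩
  rcases h12 v t2 h2 with ⟨t1, h1, hle1⟩
  exact ⟨t1, h1, le_trans hle1 hle2⟩

lemma pvLe_insert {d : PySem.Dict String Int} {v : String} {a : Int}
    (h : d.get? v = none ∨ ∃ dv, d.get? v = some dv ∧ a ≤ dv) : PvLe (d.insert v a) d := by
  intro x t hx
  rw [PySem.Dict.get?_insert]
  by_cases hxv : x = v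
  · subst hxv
    rcases h with h | ⟨dv, hdv, hle⟩
    · rw [hx] at h; cases h
    · rw [hx] at hdv
      exact ⟨a, by simp, by injection hdv with h'; omega⟩
  · exact ⟨t, by simp [hxv, hx], le_refl _⟩

lemma pvRelax_le (hE du : Int) (st : PySem.Dict String Int × Bool) (va : String × Int) :
    PvLe (pvRelax hE du st va).1 st.1 := by
  unfold pvRelax
  split_ifs with h
  · refine pvLe_insert ?_
    rcases h with ⟨_, _, hm⟩
    cases hv : st.1.get? va.1 with
    | none => exact Or.inl rfl
    | some dv =>
      rw [hv] at hm; simp at hm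
      exact Or.inr ⟨dv, rfl, le_of_lt hm⟩
  · exact pvLe_refl _

lemma pvFoldlRelax_le (hE du : Int) (l : List (String × Int)) :
    ∀ st : PySem.Dict String Int × Bool, PvLe (l.foldl (pvRelax hE du) st).1 st.1 := by
  induction l with
  | nil => intro st; exact pvLe_refl _
  | cons x l ih =>
    intro st
    exact pvLe_trans (ih (pvRelax hE du st x)) (pvRelax_le hE du st x)

lemma pvRow_le (hE : Int) (st : PySem.Dict String Int × Bool)
    (row : String × PySem.Dict String Int) : PvLe (pvRow hE st row).1 st.1 := by
  unfold pvRow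
  cases st.1.get? row.1 with
  | none => exact pvLe_refl _
  | some du => exact pvFoldlRelax_le hE du _ st

lemma pvFoldlRow_le (hE : Int) (l : List (String × PySem.Dict String Int)) :
    ∀ st : PySem.Dict String Int × Bool, PvLe (l.foldl (pvRow hE) st).1 st.1 := by
  induction l with
  | nil => intro st; exact pvLe_refl _
  | cons x l ih =>
    intro st
    exact pvLe_trans (ih (pvRow hE st x)) (pvRow_le hE st x)

lemma pvPass_le (nsc : PySem.Dict String (PySem.Dict String Int)) (hE : Int)
    (d : PySem.Dict String Int) : PvLe (pvPass nsc hE d).1 d :=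
  pvFoldlRow_le hE nsc.items (d, false)

lemma pvFoldl_false {σ α : Type} (f : σ × Bool → α → σ × Bool)
    (hf : ∀ st x, (f st x).2 = false → f st x = st) :
    ∀ (l : List α) (st : σ × Bool), (l.foldl f st).2 = false →
      l.foldl f st = st ∧ ∀ x ∈ l, f st x = st := by
  intro l
  induction l with
  | nil => intro st _; exact ⟨rfl, by simp⟩
  | cons x l ih =>
    intro st h
    rw [List.foldl_cons] at h
    rcases ih (f st x) h with ⟨heq, hall⟩
    have hsnd : (f st x).2 = false := by rw [← heq]; exact h
    have hx : f st x = st := hf st x hsnd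
    constructor
    · rw [List.foldl_cons, heq, hx]
    · intro y hy
      rcases List.mem_cons.mp hy with rfl | hy
      · exact hx
      · have h2 := hall y hy
        rw [hx] at h2
        exact h2

lemma pvRelax_false (hE du : Int) (st : PySem.Dict String Int × Bool) (va : String × Int)
    (h : (pvRelax hE du st va).2 = false) : pvRelax hE du st va = st := by
  unfold pvRelax at h ⊢
  split_ifs at h ⊢
  · rfl

lemma pvRow_false (hE : Int) (st : PySem.Dict String Int × Bool)
    (row : String × PySem.Dict String Int) (h : (pvRow hE st row).2 = false) :
    pvRow hE st row = st := by
  unfold pvRow at *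
  cases hdu : st.1.get? row.1 with
  | none => rfl
  | some du =>
    rw [hdu] at h
    exact (pvFoldl_false (pvRelax hE du) (pvRelax_false hE du) row.2.items st h).1

lemma pvPass_closed (nsc : PySem.Dict String (PySem.Dict String Int)) (hE : Int)
    (d : PySem.Dict String Int) (hin : PvInner nsc) (h : (pvPass nsc hE d).2 = false) :
    PvClosed nsc hE d := by
  intro u du nbrs v a hdu hu hv hda hahe
  rcases pvFoldl_false (pvRow hE) (pvRow_false hE) nsc.items (d, false) h with ⟨_, hall⟩
  have hrow := hall (u, nbrs) (PySem.Dict.mem_items_of_get?_eq_some nsc hu)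
  unfold pvRow at hrow
  rw [hdu] at hrow
  simp only at hrow
  have hsnd : (nbrs.items.foldl (pvRelax hE du) (d, false)).2 = false := by rw [hrow]
  rcases pvFoldl_false (pvRelax hE du) (pvRelax_false hE du) nbrs.items (d, false) hsnd with
    ⟨_, hall2⟩
  have hmemva : (v, a) ∈ nbrs.items := PySem.Dict.mem_items_of_get?_eq_some nbrs hv
  have hva := hall2 (v, a) hmemva
  unfold pvRelax at hva
  split_ifs at hva with hc
  · exact absurd (congrArg Prod.snd hva) (by simp)
  · cases hdv : d.get? v with
    | none =>
      exact absurd ⟨hda, hahe, by rw [hdv]⟩ hc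
    | some dv =>
      refine ⟨dv, rfl, ?_⟩
      by_contra hlt
      refine absurd ⟨hda, hahe, ?_⟩ hc
      rw [hdv]
      exact decide_eq_true (by omega)

-- rank of a dist entry inside the finite candidate-time list (the loop's measure)
def pvG (nsc : PySem.Dict String (PySem.Dict String Int)) (t0 : Int) : Option Int → Nat
  | none => (pvTimesB nsc t0).length + 1
  | some t => ((pvTimesB nsc t0).filter (fun x => decide (x < t))).length

def pvPhi (nsc : PySem.Dict String (PySem.Dict String Int)) (S : String) (t0 : Int)
    (d : PySem.Dict String Int) : Nat :=
  ((pvVerts nsc S).map (fun v => pvG nsc t0 (d.get? v))).sum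

lemma pvFoldlRelax_sound (nsc : PySem.Dict String (PySem.Dict String Int)) (S : String)
    (t0 hE : Int) {u : String} {du : Int} {nb : PySem.Dict String Int}
    (hval : PvValid nsc S t0 hE u du) (hu : nsc.get? u = some nb) (hnodup : nb.keys.Nodup) :
    ∀ (l : List (String × Int)), (∀ va ∈ l, va ∈ nb.items) →
      ∀ st : PySem.Dict String Int × Bool, PvSound nsc S t0 hE st.1 →
        PvSound nsc S t0 hE ((l.foldl (pvRelax hE du) st)).1 := by
  intro l
  induction l with
  | nil => intro _ st hst; exact hst
  | cons va l ih =>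
    intro hl st hst
    rw [List.foldl_cons]
    refine ih (fun x hx => hl x (List.mem_cons_of_mem _ hx)) _ ?_
    unfold pvRelax
    split_ifs with hc
    · intro x t hx
      rw [PySem.Dict.get?_insert] at hx
      by_cases hxv : x = va.1
      · rw [if_pos hxv] at hx
        injection hx with hx
        subst hx
        subst hxv
        have hget : nb.get? va.1 = some va.2 := by
          have hmem : (va.1, va.2) ∈ nb.items := by
            have := hl va (List.mem_cons_self ..)
            simpa using this
          exact PySem.Dict.get?_of_mem_items nb hmem hnodup
        exact PvValid.step nb hval hu hget hc.1 hc.2.1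
      · rw [if_neg hxv] at hx
        exact hst x t hx
    · exact hst

lemma pvPass_sound (nsc : PySem.Dict String (PySem.Dict String Int)) (S : String)
    (t0 hE : Int) (hin : PvInner nsc) (d : PySem.Dict String Int)
    (hs : PvSound nsc S t0 hE d) : PvSound nsc S t0 hE (pvPass nsc hE d).1 := by
  have main : ∀ (l : List (String × PySem.Dict String Int)), (∀ row ∈ l, row ∈ nsc.items) →
      ∀ st : PySem.Dict String Int × Bool, PvSound nsc S t0 hE st.1 →
        PvSound nsc S t0 hE ((l.foldl (pvRow hE) st)).1 := by
    intro l
    induction l with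
    | nil => intro _ st hst; exact hst
    | cons row l ih =>
      intro hl st hst
      rw [List.foldl_cons]
      refine ih (fun x hx => hl x (List.mem_cons_of_mem _ hx)) _ ?_
      unfold pvRow
      cases hdu : st.1.get? row.1 with
      | none => exact hst
      | some du =>
        have hval := hst row.1 du hdu
        have hrow : row ∈ nsc.items := hl row (List.mem_cons_self ..)
        have hu : nsc.get? row.1 = some row.2 := by
          have : (row.1, row.2) ∈ nsc.items := by simpa using hrow
          exact PySem.Dict.get?_of_mem_items nsc this hin.1
        have hnodup : row.2.keys.Nodup := by
          refine hin.2 row.2 ?_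
          simp only [PySem.Dict.values]
          exact List.mem_map.mpr ⟨row, hrow, rfl⟩
        exact pvFoldlRelax_sound nsc S t0 hE hval hu hnodup row.2.items (fun _ h => h) st hst
  exact main nsc.items (fun _ h => h) (d, false) hs

lemma pvG_le (nsc : PySem.Dict String (PySem.Dict String Int)) (t0 : Int) (o : Option Int) :
    pvG nsc t0 o ≤ (pvTimesB nsc t0).length + 1 := by
  cases o with
  | none => exact le_refl _
  | some t => exact le_trans (List.length_filter_le _ _) (Nat.le_succ _)

lemma pvG_lt_none (nsc : PySem.Dict String (PySem.Dict String Int)) (t0 a : Int) :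
    pvG nsc t0 (some a) < pvG nsc t0 none :=
  Nat.lt_succ_of_le (List.length_filter_le _ _)

lemma pvG_mono (nsc : PySem.Dict String (PySem.Dict String Int)) (t0 : Int) {t' t : Int}
    (h : t' ≤ t) : pvG nsc t0 (some t') ≤ pvG nsc t0 (some t) := by
  simp only [pvG, ← List.countP_eq_length_filter]
  refine List.countP_mono_left ?_
  intro x _ hx
  simp only [decide_eq_true_eq] at hx ⊢
  omega

lemma pvFilter_strict (T : List Int) {a dv : Int} (ha : a ∈ T) (h : a < dv) :
    (T.filter (fun x => decide (x < a))).length < (T.filter (fun x => decide (x < dv))).length := by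
  induction T with
  | nil => simp at ha
  | cons y T ih =>
    have hmono : (T.filter (fun x => decide (x < a))).length ≤
        (T.filter (fun x => decide (x < dv))).length := by
      simp only [← List.countP_eq_length_filter]
      refine List.countP_mono_left ?_
      intro x _ hx
      simp only [decide_eq_true_eq] at hx ⊢
      omega
    rcases List.mem_cons.mp ha with rfl | ha'
    · simp only [List.filter_cons]
      have h1 : decide (a < a) = false := by simp
      have h2 : decide (a < dv) = true := by simpa using h
      rw [h1, h2]
      simpa using Nat.lt_succ_of_le hmono
    · have hstrict := ih ha'
      simp only [List.filter_cons]
      by_cases hy : y < a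
      · have h1 : decide (y < a) = true := by simpa using hy
        have h2 : decide (y < dv) = true := by simp; omega
        rw [h1, h2]
        simpa using hstrict
      · have h1 : decide (y < a) = false := by simpa using hy
        rw [h1]
        cases hdec : decide (y < dv) <;> simp <;> omega
    

lemma pvSum_lt (V : List String) (f g : String → Nat) (hle : ∀ v ∈ V, f v ≤ g v)
    {v : String} (hv : v ∈ V) (hlt : f v < g v) : (V.map f).sum < (V.map g).sum := by
  induction V with
  | nil => simp at hv
  | cons x V ih =>
    simp only [List.map_cons, List.sum_cons]
    rcases List.mem_cons.mp hv with rfl | hv'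
    · have : (V.map f).sum ≤ (V.map g).sum :=
        List.sum_le_sum (fun y hy => hle y (List.mem_cons_of_mem _ hy))
      omega
    · have hx : f x ≤ g x := hle x (List.mem_cons_self ..)
      have := ih (fun y hy => hle y (List.mem_cons_of_mem _ hy)) hv'
      omega

lemma pvPhi_mono (nsc : PySem.Dict String (PySem.Dict String Int)) (S : String) (t0 : Int)
    {d' d : PySem.Dict String Int} (h : PvLe d' d) : pvPhi nsc S t0 d' ≤ pvPhi nsc S t0 d := by
  refine List.sum_le_sum ?_
  intro v _
  cases hv : d.get? v with
  | none => exact le_trans (pvG_le nsc t0 _) (le_refl _)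
  | some t =>
    rcases h v t hv with ⟨t', ht', hle⟩
    rw [ht']
    exact pvG_mono nsc t0 hle

lemma pvPhi_insert_lt (nsc : PySem.Dict String (PySem.Dict String Int)) (S : String) (t0 : Int)
    {d : PySem.Dict String Int} {v : String} {a : Int} (hv : v ∈ pvVerts nsc S)
    (ha : a ∈ pvTimesB nsc t0)
    (hcond : d.get? v = none ∨ ∃ dv, d.get? v = some dv ∧ a < dv) :
    pvPhi nsc S t0 (d.insert v a) < pvPhi nsc S t0 d := by
  have hpoint : ∀ x ∈ pvVerts nsc S, pvG nsc t0 ((d.insert v a).get? x) ≤ pvG nsc t0 (d.get? x) := by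
    intro x _
    rw [PySem.Dict.get?_insert]
    by_cases hxv : x = v
    · rw [if_pos hxv, hxv]
      rcases hcond with hc | ⟨dv, hdv, hlt⟩
      · rw [hc]; exact le_of_lt (pvG_lt_none nsc t0 a)
      · rw [hdv]; exact le_of_lt (pvFilter_strict _ ha hlt)
    · rw [if_neg hxv]
  have hstrict : pvG nsc t0 ((d.insert v a).get? v) < pvG nsc t0 (d.get? v) := by
    rw [PySem.Dict.get?_insert, if_pos rfl]
    rcases hcond with hc | ⟨dv, hdv, hlt⟩
    · rw [hc]; exact pvG_lt_none nsc t0 a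
    · rw [hdv]; exact pvFilter_strict _ ha hlt
  exact pvSum_lt _ _ _ hpoint hv hstrict

lemma pvFoldlRelax_phi (nsc : PySem.Dict String (PySem.Dict String Int)) (S : String)
    (t0 hE du : Int) {nb : PySem.Dict String Int} (hnb : nb ∈ nsc.values)
    (d : PySem.Dict String Int) :
    ∀ (l : List (String × Int)), (∀ va ∈ l, va ∈ nb.items) →
      ∀ st : PySem.Dict String Int × Bool,
        (PvLe st.1 d ∧ (st.2 = true → pvPhi nsc S t0 st.1 < pvPhi nsc S t0 d)) →
        (PvLe (l.foldl (pvRelax hE du) st).1 d ∧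
          ((l.foldl (pvRelax hE du) st).2 = true →
            pvPhi nsc S t0 (l.foldl (pvRelax hE du) st).1 < pvPhi nsc S t0 d)) := by
  intro l
  induction l with
  | nil => intro _ st hst; exact hst
  | cons va l ih =>
    intro hl st hst
    rw [List.foldl_cons]
    refine ih (fun x hx => hl x (List.mem_cons_of_mem _ hx)) _ ?_
    have hle' : PvLe (pvRelax hE du st va).1 st.1 := pvRelax_le hE du st va
    constructor
    · exact pvLe_trans hle' hst.1
    · intro hfl
      unfold pvRelax at hfl ⊢
      split_ifs at hfl ⊢ with hc
      · have hvmem : va.1 ∈ pvVerts nsc S := by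
          have hk := PySem.Dict.mem_keys_of_mem_items nb (by simpa using hl va (List.mem_cons_self ..))
          simp only [pvVerts, List.mem_dedup, List.mem_cons, List.mem_flatMap]
          exact Or.inr ⟨nb, hnb, hk⟩
        have hamem : va.2 ∈ pvTimesB nsc t0 := by
          simp only [pvTimesB, List.mem_cons, List.mem_flatMap]
          refine Or.inr ⟨nb, hnb, ?_⟩
          simp only [PySem.Dict.values]
          exact List.mem_map.mpr ⟨va, hl va (List.mem_cons_self ..), rfl⟩
        have hcond : st.1.get? va.1 = none ∨ ∃ dv, st.1.get? va.1 = some dv ∧ va.2 < dv := by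
          rcases hc with ⟨_, _, hm⟩
          cases hg : st.1.get? va.1 with
          | none => exact Or.inl rfl
          | some dv =>
            rw [hg] at hm
            simp only [decide_eq_true_eq] at hm
            exact Or.inr ⟨dv, rfl, hm⟩
        calc pvPhi nsc S t0 (st.1.insert va.1 va.2)
            < pvPhi nsc S t0 st.1 := pvPhi_insert_lt nsc S t0 hvmem hamem hcond
          _ ≤ pvPhi nsc S t0 d := pvPhi_mono nsc S t0 hst.1
      · exact hst.2 hfl

lemma pvPass_phi (nsc : PySem.Dict String (PySem.Dict String Int)) (S : String)
    (t0 hE : Int) (d : PySem.Dict String Int) (h : (pvPass nsc hE d).2 = true) :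
    pvPhi nsc S t0 (pvPass nsc hE d).1 < pvPhi nsc S t0 d := by
  have main : ∀ (l : List (String × PySem.Dict String Int)), (∀ row ∈ l, row ∈ nsc.items) →
      ∀ st : PySem.Dict String Int × Bool,
        (PvLe st.1 d ∧ (st.2 = true → pvPhi nsc S t0 st.1 < pvPhi nsc S t0 d)) →
        (PvLe (l.foldl (pvRow hE) st).1 d ∧
          ((l.foldl (pvRow hE) st).2 = true →
            pvPhi nsc S t0 (l.foldl (pvRow hE) st).1 < pvPhi nsc S t0 d)) := by
    intro l
    induction l with
    | nil => intro _ st hst; exact hst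
    | cons row l ih =>
      intro hl st hst
      rw [List.foldl_cons]
      refine ih (fun x hx => hl x (List.mem_cons_of_mem _ hx)) _ ?_
      unfold pvRow
      cases hdu : st.1.get? row.1 with
      | none => exact hst
      | some du =>
        have hnb : row.2 ∈ nsc.values := by
          simp only [PySem.Dict.values]
          exact List.mem_map.mpr ⟨row, hl row (List.mem_cons_self ..), rfl⟩
        exact pvFoldlRelax_phi nsc S t0 hE du hnb d row.2.items (fun _ h => h) st hst
  exact (main nsc.items (fun _ h => h) (d, false) ⟨pvLe_refl d, by simp⟩).2 h

lemma pvStartHas_of_le {S : String} {t0 : Int} {d' d : PySem.Dict String Int}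
    (hle : PvLe d' d) (h : PvStartHas S t0 d) : PvStartHas S t0 d' := by
  rcases h with ⟨ts, hts, hle0⟩
  rcases hle S ts hts with ⟨ts', hts', hle'⟩
  exact ⟨ts', hts', le_trans hle' hle0⟩

lemma pvLoopB_spec (nsc : PySem.Dict String (PySem.Dict String Int)) (S : String)
    (t0 hE : Int) (hin : PvInner nsc) :
    ∀ (fuel : Nat) (d : PySem.Dict String Int),
      PvSound nsc S t0 hE d → PvStartHas S t0 d → pvPhi nsc S t0 d < fuel →
      PvSound nsc S t0 hE (pvLoopB nsc hE fuel d) ∧ PvStartHas S t0 (pvLoopB nsc hE fuel d) ∧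
        PvClosed nsc hE (pvLoopB nsc hE fuel d) := by
  intro fuel
  induction fuel with
  | zero => intro d _ _ hlt; exact absurd hlt (Nat.not_lt_zero _)
  | succ fuel ih =>
    intro d hs hst hlt
    simp only [pvLoopB]
    by_cases hch : (pvPass nsc hE d).2 = true
    · rw [if_pos hch]
      refine ih (pvPass nsc hE d).1 (pvPass_sound nsc S t0 hE hin d hs)
        (pvStartHas_of_le (pvPass_le nsc hE d) hst) ?_
      have := pvPass_phi nsc S t0 hE d hch
      omega
    · rw [if_neg hch]
      have hfalse : (pvPass nsc hE d).2 = false := by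
        cases h2 : (pvPass nsc hE d).2
        · rfl
        · exact absurd h2 hch
      have heq : pvPass nsc hE d = (d, false) :=
        (pvFoldl_false (pvRow hE) (pvRow_false hE) nsc.items (d, false) hfalse).1
      rw [heq]
      exact ⟨hs, hst, pvPass_closed nsc hE d hin hfalse⟩

lemma pvComplete {nsc : PySem.Dict String (PySem.Dict String Int)} {S : String} {t0 hE : Int}
    {d : PySem.Dict String Int} (hc : PvClosed nsc hE d) (hst : PvStartHas S t0 d)
    {v : String} {a : Int} (h : PvValid nsc S t0 hE v a) :
    ∃ dv, d.get? v = some dv ∧ dv ≤ a := by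
  induction h with
  | base => exact hst
  | step nbrs _ hu hv hta hhe ih =>
    rcases ih with ⟨du, hdu, hle⟩
    exact hc _ du nbrs _ _ hdu hu hv (le_trans hle hta) hhe

theorem pvA_isAns (sc : List (String × List (String × Int))) (S en : String) (t0 hE : Int) :
    PvIsAns (pvDecode sc) S t0 hE en (shortest_path_algoithm sc S en t0 hE) := by
  have hrw : shortest_path_algoithm sc S en t0 hE =
      pvLoopA (pvDecode sc) en t0 hE (pvFuelA (pvDecode sc) S)
        [(t0, S, [(S, t0)])] PySem.Dict.empty := rfl
  rw [hrw]
  set nsc := pvDecode sc with hnsc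
  refine pvLoopA_isAns nsc S en t0 hE (pvInner_decode sc) _ _ _ ?_ ?_
  · refine ⟨?_, ?_, ?_, ?_, PySem.Dict.get?_empty en, ?_⟩
    · intro e he
      rcases List.mem_singleton.mp he with rfl
      exact PvValid.base
    · intro x tx hx
      rw [PySem.Dict.get?_empty] at hx
      cases hx
    · intro x tx hx
      rw [PySem.Dict.get?_empty] at hx
      cases hx
    · intro x tx hx
      rw [PySem.Dict.get?_empty] at hx
      cases hx
    · exact Or.inr ⟨(t0, S, [(S, t0)]), List.mem_singleton.mpr rfl, rfl, le_refl t0⟩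
  · have hcnt : ((pvVerts nsc S).filter
        (fun v => ((PySem.Dict.empty : PySem.Dict String Int).get? v).isNone)).length
        ≤ (pvVerts nsc S).length := List.length_filter_le _ _
    have hprod : ((pvVerts nsc S).filter
        (fun v => ((PySem.Dict.empty : PySem.Dict String Int).get? v).isNone)).length
          * (pvEdgesA nsc + 1)
        ≤ (pvVerts nsc S).length * (pvEdgesA nsc + 1) :=
      Nat.mul_le_mul_right _ hcnt
    unfold pvMeasA pvFuelA
    simp only [List.length_singleton]
    omega

theorem pvB_isAns (sc : List (String × List (String × Int))) (S en : String) (t0 hE : Int) :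
    PvIsAns (pvDecode sc) S t0 hE en (shortest_path_algoithm_alt sc S en t0 hE) := by
  have hrw : shortest_path_algoithm_alt sc S en t0 hE =
      (pvLoopB (pvDecode sc) hE (pvFuelB (pvDecode sc) S t0)
        (PySem.Dict.empty.insert S t0)).get? en := rfl
  rw [hrw]
  set nsc := pvDecode sc with hnsc
  have hin := pvInner_decode sc
  have hs0 : PvSound nsc S t0 hE (PySem.Dict.empty.insert S t0) := by
    intro v t hv
    rw [PySem.Dict.get?_insert] at hv
    by_cases hvS : v = S
    · rw [if_pos hvS] at hv
      injection hv with hv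
      subst hv; subst hvS
      exact PvValid.base
    · rw [if_neg hvS, PySem.Dict.get?_empty] at hv
      cases hv
  have hst0 : PvStartHas S t0 (PySem.Dict.empty.insert S t0) :=
    ⟨t0, PySem.Dict.get?_insert_self _ _ _, le_refl _⟩
  have hphi : pvPhi nsc S t0 (PySem.Dict.empty.insert S t0) < pvFuelB nsc S t0 := by
    have h1 : pvPhi nsc S t0 (PySem.Dict.empty.insert S t0) ≤
        (pvVerts nsc S).length * ((pvTimesB nsc t0).length + 1) := by
      have := List.sum_le_card_nsmul
        ((pvVerts nsc S).map (fun v => pvG nsc t0 ((PySem.Dict.empty.insert S t0).get? v)))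
        ((pvTimesB nsc t0).length + 1) ?_
      · simpa [pvPhi, smul_eq_mul] using this
      · intro x hx
        rcases List.mem_map.mp hx with ⟨v, _, rfl⟩
        exact pvG_le nsc t0 _
    have h2 : (pvVerts nsc S).length * ((pvTimesB nsc t0).length + 1) ≤
        (pvVerts nsc S).length * ((pvTimesB nsc t0).length + 2) :=
      Nat.mul_le_mul_left _ (by omega)
    unfold pvFuelB
    omega
  obtain ⟨hs, hst, hc⟩ := pvLoopB_spec nsc S t0 hE hin (pvFuelB nsc S t0)
    (PySem.Dict.empty.insert S t0) hs0 hst0 hphi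
  cases hr : (pvLoopB nsc hE (pvFuelB nsc S t0) (PySem.Dict.empty.insert S t0)).get? en with
  | none =>
    intro b hb
    rcases pvComplete hc hst hb with ⟨dv, hdv, _⟩
    rw [hr] at hdv
    cases hdv
  | some dv =>
    refine ⟨hs en dv hr, ?_⟩
    intro b hb
    rcases pvComplete hc hst hb with ⟨dv', hdv', hle⟩
    rw [hr] at hdv'
    injection hdv' with h'
    omega


-- ===== VERDICT (by name: the statement is the Claim_ definition above) =====
theorem shortest_path_algoithm_spec : Claim_equal_shortest_path_algoithm := by
  intro sc S en t0 hE _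
  unfold Spec_shortest_path_algoithm
  exact pvIsAns_unique (pvA_isAns sc S en t0 hE) (pvB_isAns sc S en t0 hE)
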